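-- pv_equiv track=rewrite | github.com/6reduk/sfmc | src/sfmc/util.py | any_keys_not_none
-- ===== SOURCE A (Python) =====
-- def any_keys_not_none(d: dict, required: list):
--     """
--     Check although 1 element is not None but not all required
--     :param d:
--     :param required:
--     :return:
--     """
--     passed = 0
--     for r in required:
--         v = d.get(r)
--         if v is not None:
--             passed += 1
--
--     if len(required) == 1 and passed == len(required):  # Exclusion for sequence with 1 element
--         return True
--
--     return 0 < passed < len(required)
-- ===== SOURCE B (Python) =====
-- def any_keys_not_none(d: dict, required: list):
--     has_some = any(d.get(r) is not None for r in required)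
--     has_all = all(d.get(r) is not None for r in required)
--     if len(required) == 1:
--         return has_some
--     return has_some and not has_all
-- ===== Notes on version B (the rewrite author's own statement) =====
-- stated objective: idiomatic
-- what changed: Replaces the integer tally of non-None keys with two short-circuiting existence flags (any/all over d.get), keeping the single-key special case as a direct return of has_some.
import Mathlib
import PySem

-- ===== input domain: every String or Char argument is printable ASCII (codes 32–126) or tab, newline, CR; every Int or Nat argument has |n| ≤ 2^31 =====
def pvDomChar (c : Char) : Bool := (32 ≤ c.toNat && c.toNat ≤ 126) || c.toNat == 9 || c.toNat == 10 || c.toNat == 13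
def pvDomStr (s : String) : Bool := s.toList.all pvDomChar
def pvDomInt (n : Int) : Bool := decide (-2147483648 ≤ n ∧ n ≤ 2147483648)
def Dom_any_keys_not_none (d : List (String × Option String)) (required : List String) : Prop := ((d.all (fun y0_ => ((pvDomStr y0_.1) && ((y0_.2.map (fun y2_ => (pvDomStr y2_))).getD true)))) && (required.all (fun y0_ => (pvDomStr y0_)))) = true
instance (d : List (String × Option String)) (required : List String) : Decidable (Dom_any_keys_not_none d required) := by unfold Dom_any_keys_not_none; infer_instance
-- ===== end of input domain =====

-- B replaces A's integer tally with two short-circuiting any/all existence flags (idiomatic decomposition); same values everywhere.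

-- ===== PORT A =====
-- d.get(r): first-match association-list lookup; a stored Python None is `none`, a missing key also yields `none`.
def pyGetKey (d : List (String × Option String)) (r : String) : Option String :=
  match d.find? (fun p => p.1 == r) with
  | some p => p.2
  | none => none

def any_keys_not_none (d : List (String × Option String)) (required : List String) : Bool :=
  let passed := required.foldl (fun acc r => if (pyGetKey d r).isSome then acc + 1 else acc) 0
  if required.length == 1 && passed == required.length then true
  else decide (0 < passed ∧ passed < required.length)

-- ===== PORT B =====
def any_keys_not_none_alt (d : List (String × Option String)) (required : List String) : Bool :=
  let hasSome := required.any (fun r => (pyGetKey d r).isSome)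
  let hasAll := required.all (fun r => (pyGetKey d r).isSome)
  if required.length == 1 then hasSome else hasSome && !hasAll

-- ===== PRECONDITION & SPEC =====
def Spec_any_keys_not_none (d : List (String × Option String)) (required : List String) (out : Bool) : Prop := out = any_keys_not_none_alt d required
instance (d : List (String × Option String)) (required : List String) (out : Bool) : Decidable (Spec_any_keys_not_none d required out) := by unfold Spec_any_keys_not_none; infer_instance

-- ===== CLAIM (what is proved, stated in full; the proofs are below) =====
def Claim_equal_any_keys_not_none : Prop := ∀ (d : List (String × Option String)) (required : List String), Dom_any_keys_not_none d required → Spec_any_keys_not_none d required (any_keys_not_none d required)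

-- ===== LEMMAS AND PROOFS =====
theorem pv_foldl_count (p : String → Bool) (req : List String) (n : Nat) :
    req.foldl (fun acc r => if p r then acc + 1 else acc) n = n + req.countP p := by
  induction req generalizing n with
  | nil => simp
  | cons x xs ih =>
    simp only [List.foldl_cons, List.countP_cons]
    by_cases h : p x = true <;> simp [h, ih] <;> omega

theorem pv_branch_eq (c n : Nat) (h : c ≤ n) :
    (if n == 1 && c == n then true else decide (0 < c ∧ c < n))
      = (if n == 1 then decide (0 < c) else decide (0 < c) && !decide (c = n)) := by
  simp only [Bool.and_eq_true, beq_iff_eq]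
  split_ifs with h1 h2 h2 <;> rw [Bool.eq_iff_iff] <;> simp <;> omega

-- ===== VERDICT (by name: the statement is the Claim_ definition above) =====
theorem any_keys_not_none_spec : Claim_equal_any_keys_not_none := by
  intro d required _
  unfold Spec_any_keys_not_none any_keys_not_none any_keys_not_none_alt
  have hc : (required.foldl (fun acc r => if (pyGetKey d r).isSome then acc + 1 else acc) 0)
      = required.countP (fun r => (pyGetKey d r).isSome) :=
    (pv_foldl_count _ required 0).trans (Nat.zero_add _)
  rw [hc]
  have hle : required.countP (fun r => (pyGetKey d r).isSome) ≤ required.length :=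
    List.countP_le_length
  have hany : (required.any fun r => (pyGetKey d r).isSome)
      = decide (0 < required.countP fun r => (pyGetKey d r).isSome) := by
    rw [Bool.eq_iff_iff]; simp [List.countP_pos_iff, List.any_eq_true]
  have hall : (required.all fun r => (pyGetKey d r).isSome)
      = decide ((required.countP fun r => (pyGetKey d r).isSome) = required.length) := by
    rw [Bool.eq_iff_iff]; simp [List.countP_eq_length, List.all_eq_true]
  rw [hany, hall]
  exact pv_branch_eq _ _ hle
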